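-- pv_equiv track=rewrite | github.com/Tarantor/Research-and-implementation-of-binary-protocol-reverse-engineering-based-on-traffic-behavior | master_paper/chapter4/flip.py | use_magnitude_judge
-- ===== SOURCE A (Python) =====
-- import math
--
-- def use_magnitude_judge(magnitude_num: list):
--     bit_mark = []
--     boundary_mark = set()
--     for bit_pos in range(0, len(magnitude_num) - 1):
--         if magnitude_num[bit_pos] < magnitude_num[bit_pos + 1]:
--             bit_mark.append(bit_pos+1)
--             boundary_mark.add(math.floor(bit_pos / 8))
--     return bit_mark, boundary_mark
-- ===== SOURCE B (Python) =====
-- def use_magnitude_judge(magnitude_num: list):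
--     n = len(magnitude_num)
--     bit_mark = []
--     boundary_mark = set()
--     for byte in range((n + 6) // 8):
--         hi = min(8 * byte + 8, n - 1)
--         rises = [i + 1 for i in range(8 * byte, hi) if magnitude_num[i] < magnitude_num[i + 1]]
--         bit_mark += rises
--         if rises:
--             boundary_mark.add(byte)
--     return bit_mark, boundary_mark
-- ===== Notes on version B (the rewrite author's own statement) =====
-- stated objective: alternative
-- what changed: A runs one flat loop over every bit position, pushing floor(bit_pos/8) into the set on each rise; B instead iterates over byte indices, collects each byte's rise marks with a comprehension over that 8-wide window, and adds the byte index at most once per window (iff the window produced any mark).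
import Mathlib
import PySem

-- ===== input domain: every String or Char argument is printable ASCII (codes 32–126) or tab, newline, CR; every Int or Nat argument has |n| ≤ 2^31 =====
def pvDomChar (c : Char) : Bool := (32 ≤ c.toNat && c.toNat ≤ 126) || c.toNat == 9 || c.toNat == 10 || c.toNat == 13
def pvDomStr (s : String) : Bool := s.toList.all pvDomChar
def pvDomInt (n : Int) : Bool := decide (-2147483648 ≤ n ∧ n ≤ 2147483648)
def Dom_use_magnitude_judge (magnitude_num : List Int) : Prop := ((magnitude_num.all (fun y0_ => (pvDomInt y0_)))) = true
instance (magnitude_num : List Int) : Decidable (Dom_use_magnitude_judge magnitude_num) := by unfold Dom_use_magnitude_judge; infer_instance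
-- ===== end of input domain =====

-- B walks the data byte-by-byte: for each byte window it collects that window's rise
-- marks in one comprehension and adds the byte index once if the window has any
-- (alternative decomposition; same cost as A's flat per-bit loop).

-- ===== PORT A =====
-- A: single flat loop over bit positions, appending bit_pos+1 and adding floor(bit_pos/8) per rise
def use_magnitude_judge (magnitude_num : List Int) : List Int × List Int :=
  let r := (PySem.List.pyRange 0 ((magnitude_num.length : Int) - 1) 1).foldl
    (fun (acc : List Int × PySem.Set Int) bit_pos =>
      if PySem.List.pyGetD magnitude_num bit_pos 0 < PySem.List.pyGetD magnitude_num (bit_pos + 1) 0 then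
        (acc.1 ++ [bit_pos + 1], PySem.Set.add acc.2 (PySem.Int.floordiv bit_pos 8))
      else acc)
    ([], PySem.Set.empty)
  (r.1, r.2)

-- ===== PORT B =====
-- B: outer loop over byte indices; per byte a comprehension over that byte's window,
-- the byte index is added once iff its window produced any rise
def use_magnitude_judge_alt (magnitude_num : List Int) : List Int × List Int :=
  let n : Int := (magnitude_num.length : Int)
  (PySem.List.pyRange 0 (PySem.Int.floordiv (n + 6) 8) 1).foldl
    (fun (acc : List Int × PySem.Set Int) byte =>
      let hi := min (8 * byte + 8) (n - 1)
      let rises := (PySem.List.pyRange (8 * byte) hi 1).filterMap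
        (fun i => if PySem.List.pyGetD magnitude_num i 0 < PySem.List.pyGetD magnitude_num (i + 1) 0 then some (i + 1) else none)
      (acc.1 ++ rises, if rises = [] then acc.2 else PySem.Set.add acc.2 byte))
    ([], PySem.Set.empty)

-- ===== PRECONDITION & SPEC =====
def Spec_use_magnitude_judge (magnitude_num : List Int) (out : List Int × List Int) : Prop := out = use_magnitude_judge_alt magnitude_num
instance (magnitude_num : List Int) (out : List Int × List Int) : Decidable (Spec_use_magnitude_judge magnitude_num out) := by unfold Spec_use_magnitude_judge; infer_instance

-- ===== CLAIM (what is proved, stated in full; the proofs are below) =====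
def Claim_equal_use_magnitude_judge : Prop := ∀ (magnitude_num : List Int), Dom_use_magnitude_judge magnitude_num → Spec_use_magnitude_judge magnitude_num (use_magnitude_judge magnitude_num)

-- ===== LEMMAS AND PROOFS =====

theorem pv_filterMap_ite (P : Int → Prop) [DecidablePred P] (l : List Int) (f : Int → Int) :
    l.filterMap (fun j => if P j then some (f j) else none)
      = (l.filter (fun j => decide (P j))).map f := by
  induction l with
  | nil => rfl
  | cons a t ih => by_cases hp : P a <;> simp [hp, ih]

-- folding A's step over a list of indices all lying in byte v
theorem pv_chunk (P : Int → Prop) [DecidablePred P] (l : List Int) (v : Int)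
    (hv : ∀ i ∈ l, PySem.Int.floordiv i 8 = v) :
    ∀ (bm : List Int) (s : PySem.Set Int),
      l.foldl (fun (acc : List Int × PySem.Set Int) i =>
        if P i then (acc.1 ++ [i + 1], PySem.Set.add acc.2 (PySem.Int.floordiv i 8)) else acc) (bm, s)
      = (bm ++ (l.filter (fun i => decide (P i))).map (· + 1),
         if (l.filter (fun i => decide (P i))) = [] then s else PySem.Set.add s v) := by
  induction l with
  | nil => intro bm s; simp
  | cons hd tl ih =>
      intro bm s
      have hhd : PySem.Int.floordiv hd 8 = v := hv hd (by simp)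
      have htl : ∀ i ∈ tl, PySem.Int.floordiv i 8 = v := fun i hi => hv i (by simp [hi])
      by_cases h : P hd
      · simp only [List.foldl_cons, if_pos h, hhd, ih htl]
        by_cases he : tl.filter (fun i => decide (P i)) = [] <;>
          simp [h, he]
      · simp only [List.foldl_cons, if_neg h, ih htl]
        simp [h]

-- the flat bit range is the concatenation of the byte windows
theorem pv_range_split (m : Int) :
    ∀ k : Nat, (PySem.List.pyRange 0 (k : Int) 1).flatMap
        (fun b => PySem.List.pyRange (8 * b) (min (8 * b + 8) m) 1)
      = PySem.List.pyRange 0 (min (8 * (k : Int)) m) 1 := by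
  intro k
  induction k with
  | zero =>
      by_cases h : 0 ≤ m
      · simp [PySem.List.pyRange_one_eq_nil]
      · rw [min_eq_right (by omega), PySem.List.pyRange_one_eq_nil (by omega),
            PySem.List.pyRange_one_eq_nil (by omega)]
        simp
  | succ k ih =>
      push_cast
      rw [PySem.List.pyRange_one_succ_right (by exact_mod_cast Int.natCast_nonneg k)]
      rw [List.flatMap_append, ih]
      simp only [List.flatMap_cons, List.flatMap_nil, List.append_nil]
      by_cases h : m ≤ 8 * (k : Int)
      · rw [min_eq_right h, min_eq_right (show m ≤ 8 * (k : Int) + 8 by omega),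
            PySem.List.pyRange_one_eq_nil (show m ≤ 8 * (k : Int) by omega), List.append_nil,
            min_eq_right (show m ≤ 8 * ((k : Int) + 1) by omega)]
      · rw [min_eq_left (show 8 * (k : Int) ≤ m by omega)]
        rw [← PySem.List.pyRange_one_append 0 (8 * (k : Int)) (min (8 * (k : Int) + 8) m)
              (by positivity) (le_min (by omega) (by omega))]
        congr 1

-- folding A's step over the concatenated windows = B's byte loop
theorem pv_chunks_fold (xs : List Int) :
    ∀ (bl : List Int) (bm : List Int) (s : PySem.Set Int),
      (bl.flatMap (fun b => PySem.List.pyRange (8 * b) (min (8 * b + 8) ((xs.length : Int) - 1)) 1)).foldl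
        (fun (acc : List Int × PySem.Set Int) i =>
          if PySem.List.pyGetD xs i 0 < PySem.List.pyGetD xs (i + 1) 0 then
            (acc.1 ++ [i + 1], PySem.Set.add acc.2 (PySem.Int.floordiv i 8))
          else acc) (bm, s)
      = bl.foldl
        (fun (acc : List Int × PySem.Set Int) byte =>
          let hi := min (8 * byte + 8) ((xs.length : Int) - 1)
          let rises := (PySem.List.pyRange (8 * byte) hi 1).filterMap
            (fun i => if PySem.List.pyGetD xs i 0 < PySem.List.pyGetD xs (i + 1) 0 then some (i + 1) else none)
          (acc.1 ++ rises, if rises = [] then acc.2 else PySem.Set.add acc.2 byte)) (bm, s) := by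
  intro bl
  induction bl with
  | nil => intro bm s; rfl
  | cons b tl ih =>
      intro bm s
      rw [List.flatMap_cons, List.foldl_append]
      have hv : ∀ i ∈ PySem.List.pyRange (8 * b) (min (8 * b + 8) ((xs.length : Int) - 1)) 1,
          PySem.Int.floordiv i 8 = b := by
        intro i hi
        rw [PySem.List.mem_pyRange_one] at hi
        rw [PySem.Int.floordiv_eq_iff_of_pos (by omega)]
        omega
      rw [pv_chunk (fun i => PySem.List.pyGetD xs i 0 < PySem.List.pyGetD xs (i + 1) 0) _ b hv bm s]
      rw [ih, List.foldl_cons]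
      have hfm := pv_filterMap_ite (fun i => PySem.List.pyGetD xs i 0 < PySem.List.pyGetD xs (i + 1) 0)
        (PySem.List.pyRange (8 * b) (min (8 * b + 8) ((xs.length : Int) - 1)) 1) (fun i => i + 1)
      congr 1
      simp only [hfm, List.map_eq_nil_iff]

theorem use_magnitude_judge_eq_alt (xs : List Int) :
    use_magnitude_judge xs = use_magnitude_judge_alt xs := by
  unfold use_magnitude_judge use_magnitude_judge_alt
  have hnb : 0 ≤ PySem.Int.floordiv ((xs.length : Int) + 6) 8 := by
    have := PySem.Int.floordiv_mul_add_mod ((xs.length : Int) + 6) 8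
    have h1 : 0 ≤ PySem.Int.mod ((xs.length : Int) + 6) 8 := PySem.Int.mod_nonneg _ (by omega)
    have h2 : PySem.Int.mod ((xs.length : Int) + 6) 8 < 8 := PySem.Int.mod_lt _ (by omega)
    omega
  have hmin : min (8 * ((PySem.Int.floordiv ((xs.length : Int) + 6) 8).toNat : Int)) ((xs.length : Int) - 1)
      = (xs.length : Int) - 1 := by
    have := PySem.Int.floordiv_mul_add_mod ((xs.length : Int) + 6) 8
    have h1 : 0 ≤ PySem.Int.mod ((xs.length : Int) + 6) 8 := PySem.Int.mod_nonneg _ (by omega)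
    have h2 : PySem.Int.mod ((xs.length : Int) + 6) 8 < 8 := PySem.Int.mod_lt _ (by omega)
    omega
  have hk : ((PySem.Int.floordiv ((xs.length : Int) + 6) 8).toNat : Int)
      = PySem.Int.floordiv ((xs.length : Int) + 6) 8 := Int.toNat_of_nonneg hnb
  rw [show PySem.List.pyRange 0 ((xs.length : Int) - 1) 1
      = (PySem.List.pyRange 0 (PySem.Int.floordiv ((xs.length : Int) + 6) 8) 1).flatMap
          (fun b => PySem.List.pyRange (8 * b) (min (8 * b + 8) ((xs.length : Int) - 1)) 1) from by
    rw [← hk, pv_range_split ((xs.length : Int) - 1) (PySem.Int.floordiv ((xs.length : Int) + 6) 8).toNat, hmin]]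
  rw [pv_chunks_fold xs]

-- ===== VERDICT (by name: the statement is the Claim_ definition above) =====
theorem use_magnitude_judge_spec : Claim_equal_use_magnitude_judge := by
  intro xs _
  exact use_magnitude_judge_eq_alt xs
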